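-- pv_equiv track=rewrite | github.com/de2425c/daily_puzzles | api/main.py | _parse_scenario_to_path
-- ===== SOURCE A (Python) =====
-- def _parse_scenario_to_path(scenario: str) -> list[str] | None:
--     """
--     Parse a scenario string back into a preflop path.
--
--     E.g., "HJ_RFI_BTN_3B_HJ_Call" -> ["HJ_RFI", "BTN_3B", "HJ_Call"]
--     """
--     if not scenario:
--         return None
--
--     # Known position prefixes
--     positions = {"SB", "BB", "UTG", "UTG1", "UTG2", "LJ", "HJ", "CO", "BTN"}
--
--     # Known action suffixes
--     actions = {"RFI", "3B", "4B", "5B", "Call"}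
--
--     parts = scenario.split("_")
--     if not parts:
--         return None
--
--     path = []
--     i = 0
--     while i < len(parts):
--         # Look for a position
--         if parts[i] in positions:
--             pos = parts[i]
--             # Look for the action part(s)
--             if i + 1 < len(parts) and parts[i + 1] in actions:
--                 path.append(f"{pos}_{parts[i + 1]}")
--                 i += 2
--             else:
--                 i += 1
--         else:
--             i += 1
--
--     return path if path else None
-- ===== SOURCE B (Python) =====
-- def _parse_scenario_to_path(scenario: str) -> list[str] | None:
--     """Pairwise re-implementation: since no token is both a position and an
--     action, A's skip-by-2 scan equals a filter over consecutive token pairs."""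
--     if not scenario:
--         return None
--     positions = {"SB", "BB", "UTG", "UTG1", "UTG2", "LJ", "HJ", "CO", "BTN"}
--     actions = {"RFI", "3B", "4B", "5B", "Call"}
--     parts = scenario.split("_")
--     path = [f"{p}_{a}" for p, a in zip(parts, parts[1:]) if p in positions and a in actions]
--     return path or None
-- ===== Notes on version B (the rewrite author's own statement) =====
-- stated objective: simpler
-- what changed: Replaced the index-driven while loop with its skip-by-2 stepping by a single comprehension filtering consecutive (position, action) token pairs from zip(parts, parts[1:]), correct because the position and action sets are disjoint.
import Mathlib
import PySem

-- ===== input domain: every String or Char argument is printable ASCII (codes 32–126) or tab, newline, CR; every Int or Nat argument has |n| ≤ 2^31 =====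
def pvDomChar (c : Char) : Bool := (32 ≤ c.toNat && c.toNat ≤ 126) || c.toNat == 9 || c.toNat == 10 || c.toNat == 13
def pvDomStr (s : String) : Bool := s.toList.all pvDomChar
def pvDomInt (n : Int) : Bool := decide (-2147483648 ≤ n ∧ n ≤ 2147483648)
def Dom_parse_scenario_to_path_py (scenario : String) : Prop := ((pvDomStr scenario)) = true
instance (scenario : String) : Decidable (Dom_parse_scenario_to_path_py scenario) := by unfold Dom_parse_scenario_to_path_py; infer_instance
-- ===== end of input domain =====

-- B replaces A's index-driven skip-by-2 while loop by a filter over consecutive token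
-- pairs (valid because no token is both a position and an action); objective: simpler.

-- ===== PORT A =====
def pvPositions : PySem.Set String :=
  PySem.Set.ofList ["SB", "BB", "UTG", "UTG1", "UTG2", "LJ", "HJ", "CO", "BTN"]

def pvActions : PySem.Set String :=
  PySem.Set.ofList ["RFI", "3B", "4B", "5B", "Call"]

-- the while loop of A: index i over parts, accumulator path
def pvLoopA (parts : List String) (i : Nat) (path : List String) : List String :=
  if h : i < parts.length then
    if PySem.Set.contains pvPositions parts[i] then
      if h2 : i + 1 < parts.length then
        if PySem.Set.contains pvActions parts[i + 1] then
          pvLoopA parts (i + 2) (path ++ [parts[i] ++ "_" ++ parts[i + 1]])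
        else
          pvLoopA parts (i + 1) path
      else
        pvLoopA parts (i + 1) path
    else
      pvLoopA parts (i + 1) path
  else path
termination_by parts.length - i

def parse_scenario_to_path_py (scenario : String) : Option (List String) :=
  if scenario = "" then none
  else
    let parts := (PySem.Str.split? scenario "_").getD []   -- sep "_" ≠ "": split? is always some
    if parts = [] then none
    else
      let path := pvLoopA parts 0 []
      if path = [] then none else some path

-- ===== PORT B =====
def parse_scenario_to_path_py_alt (scenario : String) : Option (List String) :=
  if scenario = "" then none
  else
    let parts := (PySem.Str.split? scenario "_").getD []   -- sep "_" ≠ "": split? is always some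
    let path :=
      ((parts.zip (PySem.List.slice parts (some 1) none)).filter
          (fun pa => PySem.Set.contains pvPositions pa.1 && PySem.Set.contains pvActions pa.2)).map
        (fun pa => pa.1 ++ "_" ++ pa.2)
    if path = [] then none else some path

-- ===== PRECONDITION & SPEC =====
def Spec_parse_scenario_to_path_py (scenario : String) (out : Option (List String)) : Prop := out = parse_scenario_to_path_py_alt scenario
instance (scenario : String) (out : Option (List String)) : Decidable (Spec_parse_scenario_to_path_py scenario out) := by unfold Spec_parse_scenario_to_path_py; infer_instance

-- ===== CLAIM (what is proved, stated in full; the proofs are below) =====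
def Claim_equal_parse_scenario_to_path_py : Prop := ∀ (scenario : String), Dom_parse_scenario_to_path_py scenario → Spec_parse_scenario_to_path_py scenario (parse_scenario_to_path_py scenario)

-- ===== LEMMAS AND PROOFS =====

-- B's pairwise result on a token list (proof-side abbreviation of B's comprehension)
def pvPairs (l : List String) : List String :=
  ((l.zip l.tail).filter
      (fun pa => PySem.Set.contains pvPositions pa.1 && PySem.Set.contains pvActions pa.2)).map
    (fun pa => pa.1 ++ "_" ++ pa.2)

lemma pvPairs_nil : pvPairs [] = [] := rfl

lemma pvPairs_cons_cons (x y : String) (r : List String) :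
    pvPairs (x :: y :: r) =
      (if PySem.Set.contains pvPositions x && PySem.Set.contains pvActions y
        then [x ++ "_" ++ y] else []) ++ pvPairs (y :: r) := by
  simp only [pvPairs, List.tail, List.zip_cons_cons, List.filter_cons]
  split_ifs with h <;> simp

lemma pvPairs_cons_of_not_pos (y : String) (r : List String)
    (h : PySem.Set.contains pvPositions y = false) : pvPairs (y :: r) = pvPairs r := by
  cases r with
  | nil => rfl
  | cons z r' => rw [pvPairs_cons_cons, h]; simp

-- the two literal token sets are disjoint
lemma pv_act_not_pos (s : String) (h : PySem.Set.contains pvActions s = true) :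
    PySem.Set.contains pvPositions s = false := by
  have : s = "RFI" ∨ s = "3B" ∨ s = "4B" ∨ s = "5B" ∨ s = "Call" := by
    simpa [pvActions, PySem.Set.contains, PySem.Set.ofList, PySem.Set.add,
      List.contains_eq_mem] using h
  rcases this with h | h | h | h | h <;> subst h <;> decide

-- A's while loop computes B's pairwise filter on the remaining suffix
lemma pvLoopA_eq (parts : List String) (i : Nat) (path : List String) :
    pvLoopA parts i path = path ++ pvPairs (parts.drop i) := by
  by_cases h : i < parts.length
  · have hdrop : parts.drop i = parts[i] :: parts.drop (i + 1) :=
      List.drop_eq_getElem_cons h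
    by_cases hp : PySem.Set.contains pvPositions parts[i]
    · by_cases h2 : i + 1 < parts.length
      · have hdrop2 : parts.drop (i + 1) = parts[i + 1] :: parts.drop (i + 2) :=
          List.drop_eq_getElem_cons h2
        by_cases ha : PySem.Set.contains pvActions parts[i + 1]
        · rw [pvLoopA, dif_pos h, if_pos hp, dif_pos h2, if_pos ha,
            pvLoopA_eq parts (i + 2), hdrop, hdrop2, pvPairs_cons_cons, hp, ha,
            pvPairs_cons_of_not_pos _ _ (pv_act_not_pos _ ha)]
          simp
        · have ha' : PySem.Set.contains pvActions parts[i + 1] = false := by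
            simpa using ha
          rw [pvLoopA, dif_pos h, if_pos hp, dif_pos h2, if_neg ha,
            pvLoopA_eq parts (i + 1), hdrop, hdrop2, pvPairs_cons_cons, ha']
          simp
      · have hnil : parts.drop (i + 1) = [] := List.drop_eq_nil_of_le (by omega)
        rw [pvLoopA, dif_pos h, if_pos hp, dif_neg h2, pvLoopA_eq parts (i + 1),
          hdrop, hnil, pvPairs_nil]
        rfl
    · rw [pvLoopA, dif_pos h, if_neg hp, pvLoopA_eq parts (i + 1), hdrop,
        pvPairs_cons_of_not_pos _ _ (by simpa using hp)]
  · have hnil : parts.drop i = [] := List.drop_eq_nil_of_le (by omega)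
    rw [pvLoopA, dif_neg h, hnil, pvPairs_nil, List.append_nil]
termination_by parts.length - i

-- ===== VERDICT (by name: the statement is the Claim_ definition above) =====
theorem parse_scenario_to_path_py_spec : Claim_equal_parse_scenario_to_path_py := by
  intro scenario _
  unfold Spec_parse_scenario_to_path_py parse_scenario_to_path_py parse_scenario_to_path_py_alt
  by_cases he : scenario = ""
  · simp [he]
  · rw [if_neg he, if_neg he]
    set parts := (PySem.Str.split? scenario "_").getD [] with hparts
    have hloop : pvLoopA parts 0 [] = pvPairs parts := by
      simpa using pvLoopA_eq parts 0 []
    have hslice : PySem.List.slice parts (some 1) none = parts.tail := by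
      rw [PySem.List.slice_from parts (by norm_num)]
      simp [List.drop_one]
    by_cases hp : parts = []
    · simp [hp]
    · rw [if_neg hp]
      simp only [hslice, hloop, pvPairs]
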